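-- pv_equiv track=rewrite | github.com/rrebi/University-Projects | Semester 5/Public Key Cryptography/Lab2/bellaso.py | bellaso_encrypt
-- ===== SOURCE A (Python) =====
-- def bellaso_encrypt(msg, key):
--     """
--     uses a key and the alphabet to encrypt the message. polyalphabetic substitution
--     :param msg: the msg to be encrypted
--     :param key: the keyword used for encryption
--     :return: encrypted msg
--     """
--     encoded = ''  # encrypted msg
--     alph = 'abcdefghijklmnopqrstuvwxyz'
--     offset = 0
--
--     # iterates through each character
--     for i in range(len(msg)):
--
--         # if not letter => no need to encrypt
--         if msg[i] not in alph:
--             output = msg[i]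
--             offset -= 1
--
--         # letter
--         # p1 = finds position of character in the alphabet
--         # p2 = finds position of character in the keyword
--         else:
--             p1 = alph.find(msg[i])
--             p2 = alph.find(key[((i + offset) % len(key))])
--
--             # needs wrapping around the alphabet (p1 + p2 > 25)
--             if p1 > (len(alph) - p2 - 1):
--                 # finds the alphabetical character of (p1 + p2) % 26
--                 output = alph[(p1 + p2) % 26]
--
--             # no wrapping
--             else:
--                 # finds the alphabetical character of (p1 + p2)
--                 output = alph[p1 + p2]
--
--         # add character to the string
--         encoded += output
--     return encoded
-- ===== SOURCE B (Python) =====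
-- def bellaso_encrypt(msg, key):
--     """Same encryption, decomposed: extract the letter stream, encrypt it, merge back."""
--     alph = 'abcdefghijklmnopqrstuvwxyz'
--     letters = [c for c in msg if c in alph]
--     enc = [alph[(alph.find(c) + alph.find(key[j % len(key)])) % 26]
--            for j, c in enumerate(letters)]
--     out = []
--     k = 0
--     for c in msg:
--         if c in alph:
--             out.append(enc[k])
--             k += 1
--         else:
--             out.append(c)
--     return ''.join(out)
-- ===== Notes on version B (the rewrite author's own statement) =====
-- stated objective: simpler
-- what changed: B replaces A's single pass with the running 'offset' counter and the dead wrap/no-wrap branch by a three-phase decomposition: extract the letter stream, encrypt it against the key by stream position with one (p1+p2)%26 formula, and merge the encrypted letters back over the non-letter positions.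
import Mathlib
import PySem

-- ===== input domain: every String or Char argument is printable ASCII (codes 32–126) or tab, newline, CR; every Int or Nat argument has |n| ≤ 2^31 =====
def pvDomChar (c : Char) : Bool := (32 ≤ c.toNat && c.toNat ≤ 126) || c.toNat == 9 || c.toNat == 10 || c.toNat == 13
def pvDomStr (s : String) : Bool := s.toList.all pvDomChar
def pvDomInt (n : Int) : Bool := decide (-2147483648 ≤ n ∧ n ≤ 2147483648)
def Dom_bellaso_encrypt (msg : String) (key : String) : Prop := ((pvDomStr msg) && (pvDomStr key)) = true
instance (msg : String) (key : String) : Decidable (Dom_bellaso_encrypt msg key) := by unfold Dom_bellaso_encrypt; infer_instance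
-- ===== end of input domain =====

-- B re-implements the Bellaso encryption by decomposition (extract the letter stream, encrypt it, merge back)
-- instead of A's single indexed pass with an offset counter and a dead wrap branch; return values agree on Pre_.


-- ===== PORT A =====
-- alph = 'abcdefghijklmnopqrstuvwxyz'
def pvAlph : List Char := String.toList "abcdefghijklmnopqrstuvwxyz"

-- the body of A's `for i in range(len(msg))` loop, on state (encoded, offset)
def pvAStep (kl m : List Char) (st : List Char × Int) (i : Int) : List Char × Int :=
  let encoded := st.1
  let offset := st.2
  let c := PySem.List.pyGetD m i ' '            -- msg[i]; i is always in range here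
  if ¬ (PySem.Chars.isIn [c] pvAlph) then       -- if msg[i] not in alph
    (encoded ++ [c], offset - 1)
  else
    let p1 := PySem.Chars.find pvAlph [c]
    let p2 := PySem.Chars.find pvAlph
                [PySem.List.pyGetD kl (PySem.Int.mod (i + offset) (kl.length : Int)) ' ']
    let output :=
      if p1 > ((pvAlph.length : Int) - p2 - 1) then
        PySem.List.pyGetD pvAlph (PySem.Int.mod (p1 + p2) 26) ' '
      else
        PySem.List.pyGetD pvAlph (p1 + p2) ' '  -- Python alph[p1+p2]: may be the -1 wrap-around index
    (encoded ++ [output], offset)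

-- literal port of A
def bellaso_encrypt (msg : String) (key : String) : String :=
  let m := msg.toList
  let kl := key.toList
  let st := (PySem.List.pyRange 0 (m.length : Int) 1).foldl (pvAStep kl m) ([], 0)
  String.ofList st.1

-- ===== PORT B =====
-- the body of B's merge loop `for c in msg`, on state (out, k); enc is the encrypted letter stream
def pvBStep (enc : List Char) (st : List Char × Int) (c : Char) : List Char × Int :=
  if PySem.Chars.isIn [c] pvAlph then
    (st.1 ++ [PySem.List.pyGetD enc st.2 ' '], st.2 + 1)
  else
    (st.1 ++ [c], st.2)

-- literal port of B: letters = [c for c in msg if c in alph];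
-- enc = [alph[(alph.find(c) + alph.find(key[j % len(key)])) % 26] for j, c in enumerate(letters)];
-- then the merge pass over msg with a cursor into enc
def bellaso_encrypt_alt (msg : String) (key : String) : String :=
  let m := msg.toList
  let kl := key.toList
  let letters := m.filter (fun c => PySem.Chars.isIn [c] pvAlph)
  let enc := (PySem.List.enumerate letters 0).map
    (fun jc =>
      PySem.List.pyGetD pvAlph
        (PySem.Int.mod
          (PySem.Chars.find pvAlph [jc.2] +
           PySem.Chars.find pvAlph
             [PySem.List.pyGetD kl (PySem.Int.mod jc.1 (kl.length : Int)) ' '])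
          26) ' ')
  let st := m.foldl (pvBStep enc) ([], 0)
  String.ofList st.1

-- ===== PRECONDITION & SPEC =====
-- Pre_ excludes exactly the inputs on which Python A raises ZeroDivisionError:
-- key empty while msg contains a lowercase letter (B raises there as well).
def Pre_bellaso_encrypt (msg : String) (key : String) : Prop :=
  key.toList ≠ [] ∨ msg.toList.all (fun c => !(PySem.Chars.isIn [c] pvAlph)) = true
instance (msg : String) (key : String) : Decidable (Pre_bellaso_encrypt msg key) := by
  unfold Pre_bellaso_encrypt; infer_instance

def pvWitness_bellaso_encrypt : String × String := ("attack at dawn!", "Key")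

def Spec_bellaso_encrypt (msg : String) (key : String) (out : String) : Prop := out = bellaso_encrypt_alt msg key
instance (msg : String) (key : String) (out : String) : Decidable (Spec_bellaso_encrypt msg key out) := by unfold Spec_bellaso_encrypt; infer_instance

-- ===== CLAIM (what is proved, stated in full; the proofs are below) =====
def Claim_equal_bellaso_encrypt : Prop := ∀ (msg : String) (key : String), Dom_bellaso_encrypt msg key → Pre_bellaso_encrypt msg key → Spec_bellaso_encrypt msg key (bellaso_encrypt msg key)

-- ===== LEMMAS AND PROOFS =====

-- the encryption of one letter c at letter-stream position j (reference form shared by the two invariants)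
def pvEnc (kl : List Char) (c : Char) (j : Int) : Char :=
  PySem.List.pyGetD pvAlph
    (PySem.Int.mod
      (PySem.Chars.find pvAlph [c] +
       PySem.Chars.find pvAlph [PySem.List.pyGetD kl (PySem.Int.mod j (kl.length : Int)) ' '])
      26) ' '

-- reference recursion: encrypt letters (counting them with j), pass non-letters through
def pvSpec (kl : List Char) : List Char → Int → List Char
  | [], _ => []
  | c :: rest, j =>
    if PySem.Chars.isIn [c] pvAlph then pvEnc kl c j :: pvSpec kl rest (j + 1)
    else c :: pvSpec kl rest j

lemma pvFind_ub (c : Char) : PySem.Chars.find pvAlph [c] ≤ 25 := by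
  by_cases h : 0 ≤ PySem.Chars.find pvAlph [c]
  · obtain ⟨hpre, -⟩ := PySem.Chars.find_spec (s := pvAlph) (sub := [c]) h
    have hne : pvAlph.drop (PySem.Chars.find pvAlph [c]).toNat ≠ [] := by
      intro hnil; rw [hnil] at hpre; exact (List.cons_ne_nil _ _) (List.prefix_nil.mp hpre)
    have hlt : (PySem.Chars.find pvAlph [c]).toNat < pvAlph.length := by
      by_contra hge
      exact hne (List.drop_eq_nil_of_le (by omega))
    have h26 : pvAlph.length = 26 := by decide
    omega
  · omega

-- A's wrap/no-wrap branch always computes alph[(p1+p2) % 26]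
lemma pvBranch_eq (c x : Char) (h : PySem.Chars.isIn [c] pvAlph = true) :
    (if PySem.Chars.find pvAlph [c] >
        ((pvAlph.length : Int) - PySem.Chars.find pvAlph [x] - 1) then
       PySem.List.pyGetD pvAlph
         (PySem.Int.mod (PySem.Chars.find pvAlph [c] + PySem.Chars.find pvAlph [x]) 26) ' '
     else
       PySem.List.pyGetD pvAlph
         (PySem.Chars.find pvAlph [c] + PySem.Chars.find pvAlph [x]) ' ') =
    PySem.List.pyGetD pvAlph
      (PySem.Int.mod (PySem.Chars.find pvAlph [c] + PySem.Chars.find pvAlph [x]) 26) ' ' := by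
  set p1 := PySem.Chars.find pvAlph [c] with hp1
  set p2 := PySem.Chars.find pvAlph [x] with hp2
  have h1a : 0 ≤ p1 :=
    (PySem.Chars.find_nonneg_iff _ _).mpr ((PySem.Chars.isIn_iff_infix _ _).mp h)
  have h1b : p1 ≤ 25 := pvFind_ub c
  have h2a : -1 ≤ p2 := PySem.Chars.neg_one_le_find _ _
  have h2b : p2 ≤ 25 := pvFind_ub x
  have hlen : (pvAlph.length : Int) = 26 := by decide
  split_ifs with hif
  · rfl
  · rw [hlen] at hif
    rcases lt_or_ge (p1 + p2) 0 with hneg | hpos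
    · have he : p1 + p2 = -1 := by omega
      rw [he]; decide
    · have hm : PySem.Int.mod (p1 + p2) 26 = p1 + p2 := by
        rw [PySem.Int.mod_eq_emod_of_pos (by omega : (0:Int) < 26)]
        exact Int.emod_eq_of_lt hpos (by omega)
      rw [hm]

-- step lemmas for A's loop body
lemma pvAStep_no (kl m enc : List Char) (off i : Int) (c : Char)
    (hc : PySem.Chars.isIn [c] pvAlph = false) (hg : PySem.List.pyGetD m i ' ' = c) :
    pvAStep kl m (enc, off) i = (enc ++ [c], off - 1) := by
  simp [pvAStep, hg, hc]

lemma pvAStep_yes (kl m enc : List Char) (off i : Int) (c : Char)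
    (hc : PySem.Chars.isIn [c] pvAlph = true) (hg : PySem.List.pyGetD m i ' ' = c) :
    pvAStep kl m (enc, off) i = (enc ++ [pvEnc kl c (i + off)], off) := by
  have hb := pvBranch_eq c (PySem.List.pyGetD kl (PySem.Int.mod (i + off) (kl.length : Int)) ' ') hc
  simp only [pvAStep]
  rw [hg, if_neg (by simp [hc]), hb]
  simp [pvEnc]

-- step lemmas for B's merge loop body
lemma pvBStep_no (enc out : List Char) (k : Int) (c : Char)
    (hc : PySem.Chars.isIn [c] pvAlph = false) :
    pvBStep enc (out, k) c = (out ++ [c], k) := by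
  simp [pvBStep, hc]

lemma pvBStep_yes (enc out : List Char) (k : Int) (c : Char)
    (hc : PySem.Chars.isIn [c] pvAlph = true) :
    pvBStep enc (out, k) c = (out ++ [PySem.List.pyGetD enc k ' '], k + 1) := by
  simp [pvBStep, hc]

-- getElem? of enumerate
lemma pvEnumerate_getElem? {α : Type} (xs : List α) (s : Int) (t : Nat) :
    (PySem.List.enumerate xs s)[t]? = (xs[t]?).map (fun x => (s + (t : Int), x)) := by
  induction xs generalizing s t with
  | nil => simp [PySem.List.enumerate_nil]
  | cons x xs ih =>
    rw [PySem.List.enumerate_cons]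
    cases t with
    | zero => simp
    | succ t =>
      simp only [List.getElem?_cons_succ]
      rw [ih (s + 1) t]
      cases xs[t]? with
      | none => simp
      | some v => simp; omega

-- A-side invariant: the indexed loop over the tail `rest` (starting at index pre.length,
-- with offset off) appends pvSpec of `rest` at letter-stream position pre.length + off
lemma pvA_inv (kl m : List Char) :
    ∀ (rest pre enc : List Char) (off : Int), m = pre ++ rest →
    ((PySem.List.pyRange (pre.length : Int) (m.length : Int) 1).foldl (pvAStep kl m) (enc, off)).1
      = enc ++ pvSpec kl rest ((pre.length : Int) + off) := by
  intro rest
  induction rest with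
  | nil =>
    intro pre enc off hm
    have h1 : (m.length : Int) = (pre.length : Int) := by simp [hm]
    rw [h1, PySem.List.pyRange_one_eq_nil (le_refl _)]
    simp [pvSpec]
  | cons c rest ih =>
    intro pre enc off hm
    have hlen : (pre.length : Int) < (m.length : Int) := by
      subst hm; simp only [List.length_append, List.length_cons]; push_cast; omega
    rw [PySem.List.pyRange_one_cons hlen, List.foldl_cons]
    have hg : PySem.List.pyGetD m (pre.length : Int) ' ' = c := by
      rw [PySem.List.pyGetD_natCast, List.getD_eq_getElem?_getD, hm,
        List.getElem?_append_right (le_refl _)]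
      simp
    by_cases hc : PySem.Chars.isIn [c] pvAlph = true
    · rw [pvAStep_yes kl m enc off _ c hc hg]
      have hih := ih (pre ++ [c]) (enc ++ [pvEnc kl c ((pre.length : Int) + off)]) off
        (by rw [hm]; simp)
      have hl1 : (((pre ++ [c]).length : Nat) : Int) = (pre.length : Int) + 1 := by simp
      rw [hl1] at hih
      rw [hih]
      have harg : (pre.length : Int) + 1 + off = ((pre.length : Int) + off) + 1 := by ring
      rw [harg]
      simp [pvSpec, hc]
    · rw [pvAStep_no kl m enc off _ c (by simpa using hc) hg]
      have hih := ih (pre ++ [c]) (enc ++ [c]) (off - 1) (by rw [hm]; simp)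
      have hl1 : (((pre ++ [c]).length : Nat) : Int) = (pre.length : Int) + 1 := by simp
      rw [hl1] at hih
      rw [hih]
      have harg : (pre.length : Int) + 1 + (off - 1) = (pre.length : Int) + off := by ring
      rw [harg]
      simp [pvSpec, hc]

-- B-side invariant: merging `cs` with cursor j into `enc` yields pvSpec of `cs` at position j,
-- provided enc holds the encryptions of cs's letters at absolute positions j, j+1, …
lemma pvB_inv (kl enc : List Char) :
    ∀ (cs out : List Char) (j : Nat),
    (∀ (t : Nat) (c : Char),
        (cs.filter (fun c => PySem.Chars.isIn [c] pvAlph))[t]? = some c →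
        enc[j + t]? = some (pvEnc kl c ((j + t : Nat) : Int))) →
    (cs.foldl (pvBStep enc) (out, (j : Int))).1 = out ++ pvSpec kl cs (j : Int) := by
  intro cs
  induction cs with
  | nil => intro out j _; simp [pvSpec]
  | cons c cs ih =>
    intro out j hh
    rw [List.foldl_cons]
    by_cases hc : PySem.Chars.isIn [c] pvAlph = true
    · rw [pvBStep_yes enc out _ c hc]
      have hfil : (c :: cs).filter (fun c => PySem.Chars.isIn [c] pvAlph) =
          c :: cs.filter (fun c => PySem.Chars.isIn [c] pvAlph) := by
        simp [hc]
      have h0 := hh 0 c (by rw [hfil]; simp)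
      simp only [Nat.add_zero] at h0
      have hget : PySem.List.pyGetD enc (j : Int) ' ' = pvEnc kl c (j : Int) := by
        rw [PySem.List.pyGetD_natCast, List.getD_eq_getElem?_getD, h0]
        rfl
      have hcast : ((j : Int) + 1) = (((j + 1 : Nat) : Nat) : Int) := by push_cast; ring
      rw [hget, hcast,
        ih (out ++ [pvEnc kl c (j : Int)]) (j + 1) ?_]
      · have : (((j + 1 : Nat) : Nat) : Int) = (j : Int) + 1 := by push_cast; ring
        rw [this]
        simp [pvSpec, hc]
      · intro t c' hc'
        have he : j + 1 + t = j + (t + 1) := by omega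
        rw [he]
        exact hh (t + 1) c' (by rw [hfil]; simpa using hc')
    · rw [pvBStep_no enc out _ c (by simpa using hc)]
      rw [ih (out ++ [c]) j ?_]
      · simp [pvSpec, hc]
      · intro t c' hc'
        refine hh t c' ?_
        rw [List.filter_cons, if_neg (by simp [hc])]
        exact hc'

-- ===== VERDICT (by name: the statement is the Claim_ definition above) =====
theorem bellaso_encrypt_spec : Claim_equal_bellaso_encrypt := by
  intro msg key _ _
  unfold Spec_bellaso_encrypt
  simp only [bellaso_encrypt, bellaso_encrypt_alt]
  congr 1
  have hA := pvA_inv key.toList msg.toList msg.toList [] [] 0 (by simp)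
  simp only [List.length_nil, Nat.cast_zero, List.nil_append, zero_add] at hA
  rw [hA]
  have hB := pvB_inv key.toList
      ((PySem.List.enumerate (msg.toList.filter (fun c => PySem.Chars.isIn [c] pvAlph)) 0).map
        (fun jc =>
          PySem.List.pyGetD pvAlph
            (PySem.Int.mod
              (PySem.Chars.find pvAlph [jc.2] +
               PySem.Chars.find pvAlph
                 [PySem.List.pyGetD key.toList (PySem.Int.mod jc.1 (key.toList.length : Int)) ' '])
              26) ' '))
      msg.toList [] 0 ?_
  · simp only [Nat.cast_zero, List.nil_append] at hB
    rw [hB]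
  · intro t c hc
    simp only [Nat.zero_add]
    rw [List.getElem?_map, pvEnumerate_getElem?, hc]
    simp [pvEnc]
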